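-- pv_equiv track=rewrite | github.com/Attyuttam/cp-practice | TLE eliminators/Div 800/doremy_paint.py | solution
-- ===== SOURCE A (Python) =====
-- from collections import defaultdict
--
-- def solution(n, arr):
--     if n == 1 or n==2:
--         return "Yes"
--     d = defaultdict(int)
--     for a in arr:
--         d[a]+=1
--     if len(d) == 1:
--         return "Yes"
--     if len(d) > 2:
--         return "No"
--
--     v1 = list(d.items())[0][1]
--     v2 = list(d.items())[1][1]
--
--     if n%2 == 0:
--         if v1==v2:
--             return "Yes"
--     else:
--         if v1 == v2+1 or v2 == v1+1:
--             return "Yes"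
--     return "No"
-- ===== SOURCE B (Python) =====
-- def solution(n, arr):
--     if n == 1 or n == 2:
--         return "Yes"
--     counts = []
--     run = 0
--     prev = 0
--     for x in sorted(arr):
--         if run and x == prev:
--             run += 1
--         else:
--             if run:
--                 counts.append(run)
--             run = 1
--             prev = x
--     if run:
--         counts.append(run)
--     if len(counts) == 1:
--         return "Yes"
--     if len(counts) > 2:
--         return "No"
--     v1 = counts[0]
--     v2 = counts[1]
--     if n % 2 == 0:
--         return "Yes" if v1 == v2 else "No"
--     return "Yes" if abs(v1 - v2) == 1 else "No"
-- ===== Notes on version B (the rewrite author's own statement) =====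
-- stated objective: alternative
-- what changed: Replaces the frequency dictionary with sort-then-scan: sort a copy of arr and accumulate run-lengths of equal adjacent elements in one pass; the number of runs is the distinct-value count and the two run lengths feed the same parity ladder (correct because the ladder is symmetric in the two frequencies).
import Mathlib
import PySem

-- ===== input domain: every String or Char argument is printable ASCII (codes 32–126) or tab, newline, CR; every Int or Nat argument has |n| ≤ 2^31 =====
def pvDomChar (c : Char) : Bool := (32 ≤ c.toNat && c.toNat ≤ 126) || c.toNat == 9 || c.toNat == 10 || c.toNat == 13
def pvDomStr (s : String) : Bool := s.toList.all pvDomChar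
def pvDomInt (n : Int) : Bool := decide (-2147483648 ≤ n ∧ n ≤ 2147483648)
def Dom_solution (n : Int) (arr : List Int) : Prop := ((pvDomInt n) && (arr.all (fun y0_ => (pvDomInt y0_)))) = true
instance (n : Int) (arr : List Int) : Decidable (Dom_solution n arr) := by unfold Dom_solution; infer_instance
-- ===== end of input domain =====

-- B replaces the frequency dictionary with sort-then-scan: sort a copy of arr and accumulate
-- run-lengths of equal adjacent elements in one pass; the number of runs is the distinct-value
-- count and the two run lengths feed the same parity ladder (which is symmetric in the two
-- frequencies).  Return-value equivalence; neither version mutates arr.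

-- ===== PORT A =====
def solution (n : Int) (arr : List Int) : String :=
  if n = 1 ∨ n = 2 then "Yes"
  else
    let d := arr.foldl (fun d a => d.modify a 0 (· + 1)) (PySem.Dict.empty : PySem.Dict Int Int)
    if d.size = 1 then "Yes"
    else if d.size > 2 then "No"
    else
      let v1 := (PySem.List.pyGetD d.items 0 (0, 0)).2
      let v2 := (PySem.List.pyGetD d.items 1 (0, 0)).2
      if PySem.Int.mod n 2 = 0 then
        if v1 = v2 then "Yes" else "No"
      else
        if v1 = v2 + 1 ∨ v2 = v1 + 1 then "Yes" else "No"

-- ===== PORT B =====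
-- state of Source B's loop: (counts, run, prev)
def pvStep (st : List Int × Int × Int) (x : Int) : List Int × Int × Int :=
  if st.2.1 != 0 && x == st.2.2 then (st.1, st.2.1 + 1, st.2.2)
  else ((if st.2.1 != 0 then st.1 ++ [st.2.1] else st.1), 1, x)

-- the trailing 'if run: counts.append(run)' after the loop
def pvFin (st : List Int × Int × Int) : List Int :=
  if st.2.1 != 0 then st.1 ++ [st.2.1] else st.1

def solution_alt (n : Int) (arr : List Int) : String :=
  if n = 1 ∨ n = 2 then "Yes"
  else
    let counts := pvFin ((PySem.List.sorted arr (fun x => x)).foldl pvStep ([], 0, 0))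
    if counts.length = 1 then "Yes"
    else if counts.length > 2 then "No"
    else
      let v1 := PySem.List.pyGetD counts 0 0
      let v2 := PySem.List.pyGetD counts 1 0
      if PySem.Int.mod n 2 = 0 then
        if v1 = v2 then "Yes" else "No"
      else
        if (v1 - v2).natAbs = 1 then "Yes" else "No"

-- ===== PRECONDITION & SPEC =====
-- Pre_ excludes only empty arr with n ∉ {1,2}: there A raises IndexError (indexing the
-- empty dict's items) and B raises IndexError (counts[0] on the empty run list).
def Pre_solution (n : Int) (arr : List Int) : Prop := n = 1 ∨ n = 2 ∨ arr ≠ []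
instance (n : Int) (arr : List Int) : Decidable (Pre_solution n arr) := by unfold Pre_solution; infer_instance
def pvWitness_solution : Int × List Int := (4, [1, 2, 1, 2])

def Spec_solution (n : Int) (arr : List Int) (out : String) : Prop := out = solution_alt n arr
instance (n : Int) (arr : List Int) (out : String) : Decidable (Spec_solution n arr out) := by unfold Spec_solution; infer_instance

-- ===== CLAIM (what is proved, stated in full; the proofs are below) =====
def Claim_equal_solution : Prop := ∀ (n : Int) (arr : List Int), Dom_solution n arr → Pre_solution n arr → Spec_solution n arr (solution n arr)

-- ===== LEMMAS AND PROOFS =====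

-- ---- A-side: the counter dict's items ----

-- folding Set.add skips every occurrence of an element already in the accumulator
theorem pv_foldl_add_skip (l : List Int) (acc : List Int) (x : Int) (hx : x ∈ acc) :
    l.foldl PySem.Set.add acc = (l.filter (fun y => !(y == x))).foldl PySem.Set.add acc := by
  induction l generalizing acc with
  | nil => rfl
  | cons y l ih =>
    by_cases hy : y = x
    · subst hy
      have : PySem.Set.add acc y = acc := by
        simp [PySem.Set.add, PySem.Set.contains, hx]
      simp [List.foldl, this, ih acc hx]
    · have hx' : x ∈ PySem.Set.add acc y := by
        simp [PySem.Set.add]; split <;> simp [hx]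
      simp [List.foldl, hy, ih _ hx']

-- an element absent from the tail stays at the head of the accumulator
theorem pv_foldl_add_head (l : List Int) (acc : List Int) (x : Int) (hl : x ∉ l) :
    l.foldl PySem.Set.add (x :: acc) = x :: l.foldl PySem.Set.add acc := by
  induction l generalizing acc with
  | nil => rfl
  | cons y l ih =>
    have hyx : ¬ (y = x) := fun h => hl (h ▸ List.mem_cons_self)
    have hl' : x ∉ l := fun h => hl (List.mem_cons_of_mem _ h)
    have hadd : PySem.Set.add (x :: acc) y = x :: PySem.Set.add acc y := by
      simp [PySem.Set.add, PySem.Set.contains, hyx]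
      split <;> simp
    simp [List.foldl, hadd, ih _ hl']

theorem pv_ofList_cons (x : Int) (l : List Int) :
    PySem.Set.ofList (x :: l) = x :: PySem.Set.ofList (l.filter (fun y => !(y == x))) := by
  have h1 : PySem.Set.ofList (x :: l) = l.foldl PySem.Set.add [x] := by
    simp [PySem.Set.ofList_eq_foldl, List.foldl, PySem.Set.add, PySem.Set.contains]
  have h2 := pv_foldl_add_skip l [x] x (by simp)
  have h3 := pv_foldl_add_head (l.filter (fun y => !(y == x))) [] x (by simp)
  rw [h1, h2, h3, PySem.Set.ofList_eq_foldl]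

theorem pv_ofList_nil : PySem.Set.ofList ([] : List Int) = [] := rfl

theorem pv_pyGetD_one (p q : Int × Int) : PySem.List.pyGetD [p, q] 1 (0, 0) = q := by
  simp [PySem.List.pyGetD]

-- ---- the decision ladder ----

theorem pv_ladder (n v1 v2 : Int) :
    (if PySem.Int.mod n 2 = 0 then if v1 = v2 then "Yes" else "No"
     else if v1 = v2 + 1 ∨ v2 = v1 + 1 then "Yes" else "No")
    = (if PySem.Int.mod n 2 = 0 then if v1 = v2 then "Yes" else "No"
       else if (v1 - v2).natAbs = 1 then "Yes" else "No") := by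
  by_cases h : PySem.Int.mod n 2 = 0
  · rw [if_pos h, if_pos h]
  · rw [if_neg h, if_neg h]
    by_cases hodd : v1 = v2 + 1 ∨ v2 = v1 + 1
    · have habs : (v1 - v2).natAbs = 1 := by omega
      rw [if_pos hodd, if_pos habs]
    · have habs : ¬ (v1 - v2).natAbs = 1 := by omega
      rw [if_neg hodd, if_neg habs]

-- B's ladder does not care in which order the two run lengths come
theorem pv_ladder_symm (n v1 v2 : Int) :
    (if PySem.Int.mod n 2 = 0 then if v1 = v2 then "Yes" else "No"
     else if (v1 - v2).natAbs = 1 then "Yes" else "No")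
    = (if PySem.Int.mod n 2 = 0 then if v2 = v1 then "Yes" else "No"
       else if (v2 - v1).natAbs = 1 then "Yes" else "No") := by
  by_cases h : PySem.Int.mod n 2 = 0
  · rw [if_pos h, if_pos h]
    by_cases he : v1 = v2
    · rw [if_pos he, if_pos he.symm]
    · rw [if_neg he, if_neg (fun h' => he h'.symm)]
  · rw [if_neg h, if_neg h]
    by_cases ha : (v1 - v2).natAbs = 1
    · rw [if_pos ha, if_pos (by omega)]
    · rw [if_neg ha, if_neg (by omega)]

-- ---- B-side: the run-length fold on concrete shapes ----

-- a block of copies of prev only extends the current run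
theorem pv_run_replicate (k : Nat) (counts : List Int) (run prev : Int) (h : 1 ≤ run) :
    (List.replicate k prev).foldl pvStep (counts, run, prev) = (counts, run + k, prev) := by
  induction k generalizing run with
  | zero => simp
  | succ k ih =>
    have hc : pvStep (counts, run, prev) prev = (counts, run + 1, prev) := by
      simp [pvStep]
    rw [List.replicate_succ, List.foldl_cons, hc, ih (run + 1) (by omega)]
    refine congrArg (fun z => (counts, z, prev)) ?_
    push_cast; ring

-- starting fresh on a nonempty block of copies of a
theorem pv_run_fresh (p : Nat) (a : Int) (hp : 1 ≤ p) :
    (List.replicate p a).foldl pvStep ([], 0, 0) = ([], (p : Int), a) := by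
  obtain ⟨k, rfl⟩ : ∃ k, p = k + 1 := ⟨p - 1, by omega⟩
  have h0 : pvStep ([], 0, 0) a = ([], 1, a) := by simp [pvStep]
  rw [List.replicate_succ, List.foldl_cons, h0, pv_run_replicate k [] 1 a (by omega)]
  refine congrArg (fun z => (([] : List Int), z, a)) ?_
  push_cast; ring

-- one run of m's: the run list is [p]
theorem pv_counts_one (p : Nat) (a : Int) (hp : 1 ≤ p) :
    pvFin ((List.replicate p a).foldl pvStep ([], 0, 0)) = [(p : Int)] := by
  rw [pv_run_fresh p a hp]
  simp only [pvFin]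
  rw [if_pos (by simpa using (by omega : ((p : Int)) ≠ 0))]
  simp

-- a run of m's followed by a run of other M's: the run list is [p, q]
theorem pv_counts_two (p q : Nat) (m M : Int) (hp : 1 ≤ p) (hq : 1 ≤ q) (hne : M ≠ m) :
    pvFin ((List.replicate p m ++ List.replicate q M).foldl pvStep ([], 0, 0))
      = [(p : Int), (q : Int)] := by
  obtain ⟨k, rfl⟩ : ∃ k, q = k + 1 := ⟨q - 1, by omega⟩
  rw [List.foldl_append, pv_run_fresh p m hp]
  have hM : pvStep ([], (p : Int), m) M = ([(p : Int)], 1, M) := by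
    simp [pvStep, hne]; omega
  rw [List.replicate_succ, List.foldl_cons, hM, pv_run_replicate k [(p : Int)] 1 M (by omega)]
  simp only [pvFin]
  rw [if_pos (by simpa using (by omega : (1 : Int) + (k : Int) ≠ 0))]
  simp
  omega

-- ---- sorted lists with at most two values ----

theorem pv_two_val_struct (s : List Int) (m M : Int) (hmM : m < M)
    (hsort : s.Pairwise (· ≤ ·)) (hmem : ∀ y ∈ s, y = m ∨ y = M) :
    s = List.replicate (s.count m) m ++ List.replicate (s.count M) M := by
  induction s with
  | nil => simp
  | cons x t ih =>
    rcases List.pairwise_cons.mp hsort with ⟨hx, ht⟩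
    rcases hmem x List.mem_cons_self with hxm | hxM
    · subst hxm
      have htmem : ∀ y ∈ t, y = x ∨ y = M := fun y hy => hmem y (List.mem_cons_of_mem _ hy)
      have := ih ht htmem
      rw [List.count_cons_self, List.count_cons_of_ne (by omega), List.replicate_succ,
        List.cons_append, ← this]
    · subst hxM
      have htM : ∀ y ∈ t, y = x := by
        intro y hy
        rcases hmem y (List.mem_cons_of_mem _ hy) with h | h
        · exact absurd (hx y hy) (by omega)
        · exact h
      have htrep : t = List.replicate t.length x := List.eq_replicate_of_mem htM
      have hm0 : (x :: t).count m = 0 := by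
        rw [List.count_eq_zero]
        intro hmmem
        rcases List.mem_cons.mp hmmem with h | h
        · omega
        · exact absurd (htM m h) (by omega)
      have hMl : (x :: t).count x = t.length + 1 := by
        rw [List.count_cons_self]
        conv_lhs => rw [htrep]
        rw [List.count_replicate_self]
      rw [hm0, hMl, List.replicate_zero, List.nil_append, List.replicate_succ,
        ← htrep]

-- ---- lower bound on the number of runs (no sortedness needed) ----

def pvG (run prev : Int) : Finset Int := if run ≠ 0 then {prev} else ∅

theorem pv_card_le_runs (s : List Int) : ∀ (counts : List Int) (run prev : Int), 0 ≤ run →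
    (s.toFinset ∪ pvG run prev).card + counts.length
      ≤ (pvFin (s.foldl pvStep (counts, run, prev))).length := by
  induction s with
  | nil =>
    intro counts run prev _
    by_cases h : run = 0
    · simp [pvFin, pvG, h]
    · have hG : pvG run prev = {prev} := by
        unfold pvG; rw [if_pos h]
      have hF : pvFin (counts, run, prev) = counts ++ [run] := by
        simp only [pvFin]
        rw [if_pos (by simpa using h)]
      rw [List.foldl_nil, hF, hG]
      simp
      omega
  | cons x t ih =>
    intro counts run prev h0
    rw [List.foldl_cons]
    by_cases hc : (run != 0 && x == prev) = true
    · obtain ⟨hrun, hxp⟩ : run ≠ 0 ∧ x = prev := by simpa using hc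
      have hstep : pvStep (counts, run, prev) x = (counts, run + 1, prev) := by
        simp [pvStep, hc]
      rw [hstep]
      have hset : (x :: t).toFinset ∪ pvG run prev = t.toFinset ∪ pvG (run + 1) prev := by
        have h1 : pvG run prev = {prev} := by unfold pvG; rw [if_pos hrun]
        have h2 : pvG (run + 1) prev = {prev} := by
          unfold pvG; rw [if_pos (show run + 1 ≠ 0 by omega)]
        rw [h1, h2, List.toFinset_cons, hxp]
        ext y; simp
      rw [hset]
      exact ih counts (run + 1) prev (by omega)
    · have hstep : pvStep (counts, run, prev) x
          = ((if run != 0 then counts ++ [run] else counts), 1, x) := by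
        simp only [pvStep, hc, Bool.false_eq_true, if_false]
      rw [hstep]
      have hih := ih (if run != 0 then counts ++ [run] else counts) 1 x (by omega)
      refine le_trans ?_ hih
      have hG1 : pvG 1 x = {x} := by unfold pvG; rw [if_pos (by omega)]
      have hsub : (x :: t).toFinset ∪ pvG run prev ⊆ (t.toFinset ∪ pvG 1 x) ∪ pvG run prev := by
        rw [hG1, List.toFinset_cons]
        intro y; simp
      have hcard : ((x :: t).toFinset ∪ pvG run prev).card
          ≤ (t.toFinset ∪ pvG 1 x).card + (pvG run prev).card :=
        le_trans (Finset.card_le_card hsub) (Finset.card_union_le _ _)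
      by_cases h : run = 0
      · subst h
        simp only [bne_self_eq_false, Bool.false_eq_true, if_false]
        have hz : (pvG (0 : Int) prev).card = 0 := by simp [pvG]
        omega
      · have hlen : (if run != 0 then counts ++ [run] else counts).length
            = counts.length + 1 := by simp [h]
        have hone : (pvG run prev).card = 1 := by
          unfold pvG; rw [if_pos h]
          simp
        omega

-- ---- the main equivalence ----

theorem pv_equiv (n : Int) (arr : List Int) (hpre : Pre_solution n arr) :
    solution n arr = solution_alt n arr := by
  by_cases h12 : n = 1 ∨ n = 2
  · simp [solution, solution_alt, h12]
  · have harr : arr ≠ [] := by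
      rcases hpre with h | h | h
      · exact absurd (Or.inl h) h12
      · exact absurd (Or.inr h) h12
      · exact h
    obtain ⟨a, t, rfl⟩ := List.exists_cons_of_ne_nil harr
    have hcnt : (a :: t).foldl (fun d x => d.modify x 0 (· + 1))
        (PySem.Dict.empty : PySem.Dict Int Int) = PySem.Dict.counter (a :: t) :=
      (PySem.Dict.counter_eq_foldl _).symm
    have hof := pv_ofList_cons a t
    set s := PySem.List.sorted (a :: t) (fun x => x) with hs
    have hperm : s.Perm (a :: t) := PySem.List.sorted_perm _ _ _
    have hsort : s.Pairwise (· ≤ ·) := by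
      have := PySem.List.sorted_pairwise (a :: t) (fun x => x)
      simpa using this
    rcases hfil : t.filter (fun y => !(y == a)) with _ | ⟨b, u⟩
    · -- one distinct value: both return "Yes"
      have hallt : ∀ y ∈ t, y = a := by
        intro y hy
        by_contra hya
        have : y ∈ t.filter (fun z => !(z == a)) := List.mem_filter.mpr ⟨hy, by simpa using hya⟩
        simp [hfil] at this
      have hsall : ∀ y ∈ s, y = a := by
        intro y hy
        rcases List.mem_cons.mp (hperm.mem_iff.mp hy) with h | h
        · exact h
        · exact hallt y h
      have hsrep : s = List.replicate s.length a := List.eq_replicate_of_mem hsall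
      have hlen : 1 ≤ s.length := by
        have := hperm.length_eq
        simp at this; omega
      have hcounts : pvFin (s.foldl pvStep ([], 0, 0)) = [(s.length : Int)] := by
        conv_lhs => rw [hsrep]
        exact pv_counts_one s.length a hlen
      simp [solution, solution_alt, h12, hcnt, PySem.Dict.size,
        PySem.Dict.items_counter, hof, hfil, ← hs, hcounts]
    · have hbt : b ∈ t ∧ ¬(b = a) := by
        have : b ∈ t.filter (fun y => !(y == a)) := by simp [hfil]
        have h' := List.mem_filter.mp this
        exact ⟨h'.1, by simpa using h'.2⟩
      have hof2 := pv_ofList_cons b u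
      rcases hfu : u.filter (fun y => !(y == b)) with _ | ⟨c, w⟩
      · -- exactly two distinct values
        have hmem2 : ∀ y ∈ (a :: t), y = a ∨ y = b := by
          intro y hy
          rcases List.mem_cons.mp hy with h | h
          · exact Or.inl h
          · by_cases hya : y = a
            · exact Or.inl hya
            · have hyf : y ∈ t.filter (fun z => !(z == a)) :=
                List.mem_filter.mpr ⟨h, by simpa using hya⟩
              rw [hfil] at hyf
              rcases List.mem_cons.mp hyf with h' | h'
              · exact Or.inr h'
              · by_cases hyb : y = b
                · exact Or.inr hyb
                · have : y ∈ u.filter (fun z => !(z == b)) :=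
                    List.mem_filter.mpr ⟨h', by simpa using hyb⟩
                  simp [hfu] at this
        -- the sorted copy is a block of min a b followed by a block of max a b
        set m := min a b with hm
        set M := max a b with hM
        have hmM : m < M := by
          rcases lt_or_gt_of_ne (fun h => hbt.2 h.symm) with h | h
          · simp [hm, hM]; omega
          · simp [hm, hM]; omega
        have hsmem : ∀ y ∈ s, y = m ∨ y = M := by
          intro y hy
          rcases hmem2 y (hperm.mem_iff.mp hy) with h | h <;>
            · subst h; simp [hm, hM]; omega
        have hstruct := pv_two_val_struct s m M hmM hsort hsmem
        have hma : m ∈ (a :: t) := by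
          rcases le_total a b with h | h
          · simp [hm, min_eq_left h]
          · have : m = b := by simp [hm]; omega
            rw [this]; exact List.mem_cons_of_mem _ hbt.1
        have hMa : M ∈ (a :: t) := by
          rcases le_total a b with h | h
          · have : M = b := by simp [hM]; omega
            rw [this]; exact List.mem_cons_of_mem _ hbt.1
          · simp [hM, max_eq_left h]
        have hcm : 1 ≤ s.count m := List.count_pos_iff.mpr (hperm.mem_iff.mpr hma)
        have hcM : 1 ≤ s.count M := List.count_pos_iff.mpr (hperm.mem_iff.mpr hMa)
        have hcounts : pvFin (s.foldl pvStep ([], 0, 0))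
            = [(s.count m : Int), (s.count M : Int)] := by
          conv_lhs => rw [hstruct]
          exact pv_counts_two _ _ m M hcm hcM (by omega)
        have hcnt_m : s.count m = (a :: t).count m := hperm.count_eq m
        have hcnt_M : s.count M = (a :: t).count M := hperm.count_eq M
        -- reduce A's side to its ladder over the two counts
        have hitems : (PySem.Dict.counter (a :: t)).items
            = [(a, (((a :: t).count a : Nat) : Int)), (b, (((a :: t).count b : Nat) : Int))] := by
          rw [PySem.Dict.items_counter, hof, hfil, hof2, hfu, pv_ofList_nil]
          simp only [List.map_cons, List.map_nil]
        have hA : solution n (a :: t)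
            = (if PySem.Int.mod n 2 = 0 then
                 if (((a :: t).count a : Nat) : Int) = ((a :: t).count b : Nat) then "Yes" else "No"
               else
                 if (((a :: t).count a : Nat) : Int) = ((a :: t).count b : Nat) + 1
                    ∨ (((a :: t).count b : Nat) : Int) = ((a :: t).count a : Nat) + 1
                 then "Yes" else "No") := by
          simp only [solution, if_neg h12, hcnt, PySem.Dict.size, hitems,
            List.length_cons, List.length_nil]
          rw [if_neg (by norm_num), if_neg (by norm_num), PySem.List.pyGetD_zero_cons,
            pv_pyGetD_one]
        -- reduce B's side to its ladder over the two run lengths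
        have hB : solution_alt n (a :: t)
            = (if PySem.Int.mod n 2 = 0 then
                 if ((s.count m : Nat) : Int) = (s.count M : Nat) then "Yes" else "No"
               else
                 if (((s.count m : Nat) : Int) - (s.count M : Nat)).natAbs = 1
                 then "Yes" else "No") := by
          simp only [solution_alt, if_neg h12, ← hs, hcounts,
            List.length_cons, List.length_nil]
          rw [if_neg (by norm_num), if_neg (by norm_num), PySem.List.pyGetD_zero_cons,
            show PySem.List.pyGetD [((s.count m : Nat) : Int), ((s.count M : Nat) : Int)] 1 0
              = ((s.count M : Nat) : Int) from by simp [PySem.List.pyGetD]]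
        rw [hA, hB, hcnt_m, hcnt_M]
        rcases le_total a b with hab | hab
        · have h1 : m = a := by simp [hm, min_eq_left hab]
          have h2 : M = b := by simp [hM, max_eq_right hab]
          rw [h1, h2]
          exact pv_ladder n _ _
        · have h1 : m = b := by simp [hm, min_eq_right hab]
          have h2 : M = a := by simp [hM, max_eq_left hab]
          rw [h1, h2]
          exact (pv_ladder n _ _).trans (pv_ladder_symm n _ _)
      · -- at least three distinct values: both return "No"
        have hcu : c ∈ u ∧ ¬(c = b) := by
          have : c ∈ u.filter (fun y => !(y == b)) := by simp [hfu]
          have h' := List.mem_filter.mp this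
          exact ⟨h'.1, by simpa using h'.2⟩
        have hct : c ∈ t ∧ ¬(c = a) := by
          have : c ∈ t.filter (fun y => !(y == a)) := by
            rw [hfil]; exact List.mem_cons_of_mem _ hcu.1
          have h' := List.mem_filter.mp this
          exact ⟨h'.1, by simpa using h'.2⟩
        have hof3 := pv_ofList_cons c w
        -- B side: at least 3 runs
        have hsub : ({a, b, c} : Finset Int) ⊆ s.toFinset := by
          intro y hy
          simp at hy
          rw [List.mem_toFinset, hperm.mem_iff]
          rcases hy with rfl | rfl | rfl
          · exact List.mem_cons_self
          · exact List.mem_cons_of_mem _ hbt.1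
          · exact List.mem_cons_of_mem _ hct.1
        have hcard3 : 3 ≤ s.toFinset.card := by
          have h3 : ({a, b, c} : Finset Int).card = 3 :=
            Finset.card_eq_three.mpr ⟨a, b, c, fun h => hbt.2 h.symm,
              fun h => hct.2 h.symm, fun h => hcu.2 h.symm, rfl⟩
          calc 3 = ({a, b, c} : Finset Int).card := h3.symm
            _ ≤ s.toFinset.card := Finset.card_le_card hsub
        have hruns := pv_card_le_runs s [] 0 0 le_rfl
        have hG0 : pvG 0 0 = ∅ := by simp [pvG]
        rw [hG0, Finset.union_empty] at hruns
        simp only [List.length_nil, Nat.add_zero] at hruns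
        have hlen3 : 3 ≤ (pvFin (s.foldl pvStep ([], 0, 0))).length := le_trans hcard3 hruns
        -- A side reduction
        simp only [solution, solution_alt, if_neg h12, hcnt, PySem.Dict.size,
          PySem.Dict.items_counter, hof, hfil, hof2, hfu, hof3,
          List.map_cons, List.length_cons, List.length_map, ← hs]
        rw [if_neg (by norm_num), if_pos (by norm_num),
          if_neg (by omega), if_pos (by omega)]

theorem solution_spec : Claim_equal_solution := by
  intro n arr _ hpre
  exact pv_equiv n arr hpre
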